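-- pv_equiv track=rewrite | github.com/mtyszler/advent-of-code-2023 | src/functions_day_12.py | identify_arrangement
-- ===== SOURCE A (Python) =====
-- def identify_arrangement(record: str) -> list[int]:
--     arrangement = []
--     this_count = 0
--     complete_block = False
--     for i in range(len(record)):
--         if record[i] == '#':
--             this_count += 1
--             complete_block = False
--         elif record[i] == '.':
--             if this_count > 0:
--                 arrangement.append(this_count)
--                 this_count = 0
--                 complete_block = True
--         elif record[i] == '?':
--             break
--
--     if this_count > 0:
--         arrangement.append(this_count)
--         if record[i] == '?':
--             complete_block = False
--         else:
--             complete_block = True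
--
--     return arrangement, complete_block
-- ===== SOURCE B (Python) =====
-- def identify_arrangement(record: str) -> list[int]:
--     # A counts '#' runs, where '.' ends a run, any other char is transparent,
--     # and the first '?' cuts the string off.
--     prefix = record.split('?', 1)[0]
--     segments = prefix.split('.')
--     arrangement = [c for c in (seg.count('#') for seg in segments) if c]
--     complete_block = bool(arrangement) and not ('?' in record and segments[-1].count('#'))
--     return arrangement, complete_block
-- ===== Notes on version B (the rewrite author's own statement) =====
-- stated objective: faster
-- what changed: Replaces the per-character state machine (mutable count/flag with a break and a post-loop patch-up) by split-based tokenization: cut at the first '?', split on '.', count '#' per segment, and compute the completeness flag by one closed-form boolean.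
import Mathlib
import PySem

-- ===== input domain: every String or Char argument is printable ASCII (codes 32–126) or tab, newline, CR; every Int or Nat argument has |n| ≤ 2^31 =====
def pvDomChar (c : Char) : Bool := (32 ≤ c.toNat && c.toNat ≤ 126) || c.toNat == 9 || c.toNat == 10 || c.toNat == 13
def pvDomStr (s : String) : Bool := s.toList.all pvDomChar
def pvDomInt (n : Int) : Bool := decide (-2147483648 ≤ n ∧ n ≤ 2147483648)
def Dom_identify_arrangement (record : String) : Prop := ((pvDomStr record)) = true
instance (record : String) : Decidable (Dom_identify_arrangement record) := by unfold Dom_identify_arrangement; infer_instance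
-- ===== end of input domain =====

-- B replaces A's per-character state machine by split-based tokenization with a
-- closed-form completeness flag; objective: faster (C-level str.split vs a per-char Python loop, measured).

-- ===== PORT A =====
-- A's for-loop with break: state (arrangement, this_count, complete_block);
-- the 4th component records whether the loop stopped at a '?' (then record[i] = '?';
-- if the loop runs to the end, record[i] is the last processed char, never '?').
def iaLoop : List Char → List Int → Int → Bool → List Int × Int × Bool × Bool
  | [], arr, cnt, cb => (arr, cnt, cb, false)
  | c :: rest, arr, cnt, cb =>
    if c = '#' then iaLoop rest arr (cnt + 1) false
    else if c = '.' then
      (if 0 < cnt then iaLoop rest (arr ++ [cnt]) 0 true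
       else iaLoop rest arr cnt cb)
    else if c = '?' then (arr, cnt, cb, true)
    else iaLoop rest arr cnt cb

def identify_arrangement (record : String) : List Int × Bool :=
  match iaLoop record.toList [] 0 false with
  | (arr, cnt, cb, broke) =>
    -- post-loop: if this_count > 0 append it; record[i] == '?' exactly when the loop broke
    -- (this_count > 0 implies the loop ran, so Python's record[i] is defined)
    if 0 < cnt then (arr ++ [cnt], if broke then false else true) else (arr, cb)

-- ===== PORT B =====
-- port of Python's str.split(sep) for a one-char separator (keeps empty pieces; exact)
def altSplit (sep : Char) : List Char → List (List Char)
  | [] => [[]]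
  | c :: rest =>
    let r := altSplit sep rest
    if c = sep then [] :: r else (c :: r.head!) :: r.tail

def identify_arrangement_alt (record : String) : List Int × Bool :=
  let cs := record.toList
  let prefixp := cs.takeWhile (· ≠ '?')                                -- record.split('?', 1)[0]
  let segments := altSplit '.' prefixp                                 -- prefix.split('.')
  let counts := segments.map (fun s => ((s.count '#' : Nat) : Int))    -- seg.count('#')
  let arrangement := counts.filter (fun c => c ≠ 0)                    -- [c for c in … if c]
  let complete := !arrangement.isEmpty &&
      !(cs.contains '?' && decide ((((segments.getLastD []).count '#' : Nat) : Int) ≠ 0))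
  (arrangement, complete)

-- ===== PRECONDITION & SPEC =====
def Spec_identify_arrangement (record : String) (out : List Int × Bool) : Prop := out = identify_arrangement_alt record
instance (record : String) (out : List Int × Bool) : Decidable (Spec_identify_arrangement record out) := by unfold Spec_identify_arrangement; infer_instance

-- ===== CLAIM (what is proved, stated in full; the proofs are below) =====
def Claim_equal_identify_arrangement : Prop := ∀ (record : String), Dom_identify_arrangement record → Spec_identify_arrangement record (identify_arrangement record)

-- ===== LEMMAS AND PROOFS =====

-- middle form: A's loop fused with its post-processing, output built front-to-back
def mAux : List Char → Int → Bool → List Int × Bool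
  | [], cnt, cb => if 0 < cnt then ([cnt], true) else ([], cb)
  | c :: rest, cnt, cb =>
    if c = '#' then mAux rest (cnt + 1) false
    else if c = '.' then
      (if 0 < cnt then
        let r := mAux rest 0 true
        (cnt :: r.1, r.2)
       else mAux rest cnt cb)
    else if c = '?' then (if 0 < cnt then ([cnt], false) else ([], cb))
    else mAux rest cnt cb

-- segment '#'-counts of the prefix before '?', with cnt added to the first one
def countsF (cs : List Char) (cnt : Int) : List Int :=
  ((altSplit '.' (cs.takeWhile (· ≠ '?'))).map (fun s => ((s.count '#' : Nat) : Int))).modifyHead (· + cnt)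

def Lf (cs : List Char) (cnt : Int) : List Int := (countsF cs cnt).filter (fun c => c ≠ 0)

theorem altSplit_ne_nil (sep : Char) (cs : List Char) : altSplit sep cs ≠ [] := by
  cases cs with
  | nil => simp [altSplit]
  | cons c rest => simp only [altSplit]; split <;> simp

def post (r : List Int × Int × Bool × Bool) : List Int × Bool :=
  if 0 < r.2.1 then (r.1 ++ [r.2.1], if r.2.2.2 then false else true) else (r.1, r.2.2.1)

theorem lemma1 (cs : List Char) : ∀ (arr : List Int) (cnt : Int) (cb : Bool),
    post (iaLoop cs arr cnt cb) = (arr ++ (mAux cs cnt cb).1, (mAux cs cnt cb).2) := by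
  induction cs with
  | nil =>
    intro arr cnt cb
    simp only [iaLoop, mAux, post]
    split <;> simp
  | cons c rest ih =>
    intro arr cnt cb
    simp only [iaLoop, mAux]
    by_cases h1 : c = '#'
    · simp only [if_pos h1]
      exact ih arr (cnt + 1) false
    · by_cases h2 : c = '.'
      · simp only [if_neg h1, if_pos h2]
        by_cases hp : 0 < cnt
        · simp only [if_pos hp]
          rw [ih (arr ++ [cnt]) 0 true]
          simp
        · simp only [if_neg hp]
          exact ih arr cnt cb
      · by_cases h3 : c = '?'
        · simp only [if_neg h1, if_neg h2, if_pos h3, post]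
          by_cases hp : 0 < cnt <;> simp [hp]
        · simp only [if_neg h1, if_neg h2, if_neg h3]
          exact ih arr cnt cb

theorem altSplit_cons_ne (sep c : Char) (rest : List Char) (h : ¬ c = sep) :
    altSplit sep (c :: rest) = (c :: (altSplit sep rest).head!) :: (altSplit sep rest).tail := by
  simp [altSplit, h]

theorem countsF_head (cs : List Char) (cnt : Int) :
    ∃ (x : Int) (t : List Int), countsF cs cnt = (x + cnt) :: t ∧ 0 ≤ x := by
  unfold countsF
  have hne := altSplit_ne_nil '.' (cs.takeWhile (· ≠ '?'))
  cases hs : altSplit '.' (cs.takeWhile (· ≠ '?')) with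
  | nil => exact absurd hs hne
  | cons a t =>
    exact ⟨((a.count '#' : Nat) : Int), t.map (fun s => ((s.count '#' : Nat) : Int)),
      by simp [List.modifyHead], by positivity⟩

theorem countsF_ne_nil (cs : List Char) (cnt : Int) : countsF cs cnt ≠ [] := by
  obtain ⟨x, t, h, -⟩ := countsF_head cs cnt
  simp [h]

theorem Lf_nil_last (cs : List Char) (cnt : Int) (h : Lf cs cnt = []) :
    (countsF cs cnt).getLastD 0 = 0 := by
  unfold Lf at h
  have hall : ∀ x ∈ countsF cs cnt, x = 0 := by
    intro x hx
    by_contra hne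
    have hmem : x ∈ (countsF cs cnt).filter (fun c => c ≠ 0) :=
      List.mem_filter.mpr ⟨hx, by simp [hne]⟩
    rw [h] at hmem
    exact absurd hmem (List.not_mem_nil)
  rw [List.getLastD_eq_getLast?]
  cases hl : (countsF cs cnt).getLast? with
  | none =>
    rw [List.getLast?_eq_none_iff] at hl
    exact absurd hl (countsF_ne_nil cs cnt)
  | some a =>
    have : a ∈ countsF cs cnt := List.mem_of_getLast? hl
    simp [hall a this]

theorem getLastD_irrel {α : Type} (l : List α) (a b : α) (h : l ≠ []) :
    l.getLastD a = l.getLastD b := by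
  rw [List.getLastD_eq_getLast?, List.getLastD_eq_getLast?]
  cases hl : l.getLast? with
  | none => rw [List.getLast?_eq_none_iff] at hl; exact absurd hl h
  | some x => rfl

theorem takeWhile_q_cons (c : Char) (rest : List Char) (h : ¬ c = '?') :
    List.takeWhile (fun x => x ≠ '?') (c :: rest) = c :: List.takeWhile (fun x => x ≠ '?') rest := by
  simp [h]

theorem countsF_hash (rest : List Char) (cnt : Int) :
    countsF ('#' :: rest) cnt = countsF rest (cnt + 1) := by
  unfold countsF
  rw [takeWhile_q_cons '#' rest (by decide),
    altSplit_cons_ne '.' '#' (List.takeWhile (fun x => x ≠ '?') rest) (by decide)]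
  have hne := altSplit_ne_nil '.' (rest.takeWhile (· ≠ '?'))
  cases hs : altSplit '.' (rest.takeWhile (· ≠ '?')) with
  | nil => exact absurd hs hne
  | cons a t =>
    simp [List.modifyHead]
    ring

theorem countsF_dot (rest : List Char) (cnt : Int) :
    countsF ('.' :: rest) cnt = cnt :: countsF rest 0 := by
  unfold countsF
  rw [takeWhile_q_cons '.' rest (by decide)]
  have : altSplit '.' ('.' :: List.takeWhile (fun x => x ≠ '?') rest)
      = [] :: altSplit '.' (List.takeWhile (fun x => x ≠ '?') rest) := by
    simp [altSplit]
  rw [this]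
  have hne := altSplit_ne_nil '.' (rest.takeWhile (· ≠ '?'))
  cases hs : altSplit '.' (rest.takeWhile (· ≠ '?')) with
  | nil => exact absurd hs hne
  | cons a t => simp [List.modifyHead]

theorem countsF_other (c : Char) (rest : List Char) (cnt : Int)
    (h1 : ¬ c = '#') (h2 : ¬ c = '.') (h3 : ¬ c = '?') :
    countsF (c :: rest) cnt = countsF rest cnt := by
  unfold countsF
  rw [takeWhile_q_cons c rest h3,
    altSplit_cons_ne '.' c (List.takeWhile (fun x => x ≠ '?') rest) h2]
  have hne := altSplit_ne_nil '.' (rest.takeWhile (· ≠ '?'))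
  cases hs : altSplit '.' (rest.takeWhile (· ≠ '?')) with
  | nil => exact absurd hs hne
  | cons a t => simp [List.modifyHead, h1]

theorem countsF_qmark (rest : List Char) (cnt : Int) :
    countsF ('?' :: rest) cnt = [cnt] := by
  unfold countsF
  simp [altSplit, List.modifyHead]

theorem lemma2 (cs : List Char) : ∀ (cnt : Int) (cb : Bool), 0 ≤ cnt →
    mAux cs cnt cb = (Lf cs cnt,
      if (Lf cs cnt).isEmpty then cb
      else !(cs.contains '?' && decide ((countsF cs cnt).getLastD 0 ≠ 0))) := by
  induction cs with
  | nil =>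
    intro cnt cb hcnt
    have hcf : countsF ([] : List Char) cnt = [cnt] := by
      simp [countsF, List.takeWhile, altSplit, List.modifyHead]
    simp only [mAux, Lf, hcf]
    by_cases h : cnt = 0
    · simp [h]
    · have hpos : 0 < cnt := lt_of_le_of_ne hcnt (Ne.symm h)
      simp [hpos, h, List.filter]
  | cons c rest ih =>
    intro cnt cb hcnt
    by_cases h1 : c = '#'
    · subst h1
      have hc := countsF_hash rest cnt
      have hLf : Lf ('#' :: rest) cnt = Lf rest (cnt + 1) := by unfold Lf; rw [hc]
      have hne : Lf rest (cnt + 1) ≠ [] := by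
        obtain ⟨x, t, hxt, hx⟩ := countsF_head rest (cnt + 1)
        unfold Lf
        rw [hxt]
        have : x + (cnt + 1) ≠ 0 := by omega
        simp [List.filter, this]
      have hcon : ('#' :: rest).contains '?' = rest.contains '?' := by
        simp [List.contains_cons]
      simp only [mAux, if_pos rfl]
      rw [ih (cnt + 1) false (by omega), hLf, hc, hcon]
      simp [List.isEmpty_iff, hne]
    · by_cases h2 : c = '.'
      · subst h2
        have hc := countsF_dot rest cnt
        have hcon : ('.' :: rest).contains '?' = rest.contains '?' := by
          simp [List.contains_cons]
        have hlast : (countsF ('.' :: rest) cnt).getLastD 0 = (countsF rest 0).getLastD 0 := by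
          rw [hc, List.getLastD_cons]
          exact getLastD_irrel _ _ _ (countsF_ne_nil rest 0)
        by_cases hp : 0 < cnt
        · have hcnt0 : cnt ≠ 0 := by omega
          have hLf : Lf ('.' :: rest) cnt = cnt :: Lf rest 0 := by
            unfold Lf; rw [hc]; simp [List.filter, hcnt0]
          simp only [mAux, if_neg (by decide : ¬ ('.' = '#')), if_pos rfl, if_pos hp]
          rw [ih 0 true le_rfl, hLf, hcon, hlast]
          by_cases he : Lf rest 0 = []
          · have hz := Lf_nil_last rest 0 he
            simp [he]
            right
            rw [← List.getLastD_eq_getLast?]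
            exact hz
          · simp [List.isEmpty_iff, he]
        · have hcnt0 : cnt = 0 := by omega
          subst hcnt0
          have hLf : Lf ('.' :: rest) 0 = Lf rest 0 := by
            unfold Lf; rw [hc]; simp [List.filter]
          simp only [mAux, if_neg (by decide : ¬ ('.' = '#')), if_pos rfl, if_neg hp]
          rw [ih 0 cb le_rfl, hLf, hcon, hlast]
          simp
      · by_cases h3 : c = '?'
        · subst h3
          have hc := countsF_qmark rest cnt
          have hcon : ('?' :: rest).contains '?' = true := by simp [List.contains_cons]
          simp only [mAux, if_neg (by decide : ¬ ('?' = '#')), if_neg (by decide : ¬ ('?' = '.')), if_pos rfl]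
          by_cases hp : 0 < cnt
          · have hcnt0 : cnt ≠ 0 := by omega
            have hLf : Lf ('?' :: rest) cnt = [cnt] := by
              unfold Lf; rw [hc]; simp [List.filter, hcnt0]
            simp [hp, hLf, hcon, hc, hcnt0]
          · have hcnt0 : cnt = 0 := by omega
            subst hcnt0
            have hLf : Lf ('?' :: rest) 0 = [] := by
              unfold Lf; rw [hc]; simp [List.filter]
            simp [hp, hLf]
        · have hc := countsF_other c rest cnt h1 h2 h3
          have hLf : Lf (c :: rest) cnt = Lf rest cnt := by unfold Lf; rw [hc]
          have hcon : (c :: rest).contains '?' = rest.contains '?' := by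
            simp [eq_comm, h3]
          simp only [mAux, if_neg h1, if_neg h2, if_neg h3]
          rw [ih cnt cb hcnt, hLf, hc, hcon]

theorem modifyHead_add_zero (l : List Int) : l.modifyHead (· + 0) = l := by
  cases l <;> simp [List.modifyHead]

theorem getLastD_map (f : List Char → Int) (l : List (List Char)) (h : l ≠ []) :
    (l.map f).getLastD 0 = f (l.getLastD []) := by
  rw [List.getLastD_eq_getLast?, List.getLastD_eq_getLast?, List.getLast?_map]
  cases hl : l.getLast? with
  | none => rw [List.getLast?_eq_none_iff] at hl; exact absurd hl h
  | some a => rfl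

theorem flag_glue (L : List Int) (b : Bool) :
    (if L.isEmpty then (false : Bool) else !b) = (!L.isEmpty && !b) := by
  cases L <;> simp

-- ===== VERDICT (by name: the statement is the Claim_ definition above) =====
theorem identify_arrangement_spec : Claim_equal_identify_arrangement := by
  intro record _
  unfold Spec_identify_arrangement identify_arrangement identify_arrangement_alt
  have hA : (match iaLoop record.toList [] 0 false with
      | (arr, cnt, cb, broke) =>
        if 0 < cnt then (arr ++ [cnt], if broke then false else true) else (arr, cb))
      = post (iaLoop record.toList [] 0 false) := by
    rcases iaLoop record.toList [] 0 false with ⟨a, c2, b, br⟩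
    rfl
  rw [hA, lemma1 record.toList [] 0 false, lemma2 record.toList 0 false le_rfl]
  have hmod : countsF record.toList 0
      = (altSplit '.' (record.toList.takeWhile (· ≠ '?'))).map (fun s => ((s.count '#' : Nat) : Int)) := by
    unfold countsF
    exact modifyHead_add_zero _
  have hlast : (countsF record.toList 0).getLastD 0
      = (((altSplit '.' (record.toList.takeWhile (· ≠ '?'))).getLastD []).count '#' : Nat) := by
    rw [hmod]
    exact getLastD_map _ _ (altSplit_ne_nil _ _)
  dsimp only
  rw [← hmod, ← hlast]
  unfold Lf
  rw [List.nil_append, flag_glue]
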